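-- pv_equiv track=rewrite | github.com/NataliaMantyk/skillfactory_data_science | Task 8.1. Module 8 (HW-01)/solutions_game_20att.py | game_score
-- ===== SOURCE A (Python) =====
-- def game_score(number, step=10):
--     count = 0
--     predict = 0
--     while number != predict:
--         count += 1
--         if number > predict:
--             predict += step
--         else:
--             predict -= 1
--     return count
-- ===== SOURCE B (Python) =====
-- def game_score(number, step=10):
--     # Closed form: for number <= 0 the loop just decrements, taking -number
--     # iterations; for number > 0 it climbs k = ceil(number/step) times and then
--     # descends the overshoot k*step - number.
--     if number <= 0:
--         return -number
--     k = -(-number // step)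
--     return k + (k * step - number)
-- ===== Notes on version B (the rewrite author's own statement) =====
-- stated objective: faster
-- what changed: Replaces the step-up/step-down simulation loop with a closed-form count k + (k*step - number) where k = ceil(number/step) (and -number for number <= 0).
import Mathlib
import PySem

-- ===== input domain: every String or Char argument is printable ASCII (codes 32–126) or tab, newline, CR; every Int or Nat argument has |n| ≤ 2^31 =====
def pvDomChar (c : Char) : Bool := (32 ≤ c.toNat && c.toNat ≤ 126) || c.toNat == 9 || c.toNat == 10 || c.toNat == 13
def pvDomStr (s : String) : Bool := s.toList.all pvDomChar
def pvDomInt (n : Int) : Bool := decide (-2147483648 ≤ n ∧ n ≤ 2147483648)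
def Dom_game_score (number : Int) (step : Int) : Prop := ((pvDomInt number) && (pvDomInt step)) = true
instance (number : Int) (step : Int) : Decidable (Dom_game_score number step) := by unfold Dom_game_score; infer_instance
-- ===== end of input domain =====

-- B replaces A's step-up/step-down simulation loop by the O(1) closed form
-- k + (k*step - number) with k = ceil(number/step) (and -number for number ≤ 0).

-- ===== PORT A =====
-- A's while loop; fuel bounds the iteration count (inside Pre_ the loop terminates
-- within number.natAbs + step.natAbs iterations, so the fuel is never exhausted).
def game_score_loop (number step : Int) (fuel : Nat) (count predict : Int) : Int :=
  match fuel with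
  | 0 => count
  | fuel + 1 =>
    if number = predict then count
    else if number > predict then game_score_loop number step fuel (count + 1) (predict + step)
    else game_score_loop number step fuel (count + 1) (predict - 1)

def game_score (number : Int) (step : Int) : Int :=
  game_score_loop number step (number.natAbs + step.natAbs + 1) 0 0

-- ===== PORT B =====
def game_score_alt (number : Int) (step : Int) : Int :=
  if number ≤ 0 then -number
  else
    let k := -(PySem.Int.floordiv (-number) step)
    k + (k * step - number)

-- ===== PRECONDITION & SPEC =====
-- Pre_ excludes exactly the inputs on which A's while loop never terminates
-- (number > 0 with step ≤ 0: predict never climbs to number).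
def Pre_game_score (number : Int) (step : Int) : Prop := 0 < number → 0 < step
instance (number : Int) (step : Int) : Decidable (Pre_game_score number step) := by
  unfold Pre_game_score; infer_instance

def pvWitness_game_score : Int × Int := (37, 10)

def Spec_game_score (number : Int) (step : Int) (out : Int) : Prop := out = game_score_alt number step
instance (number : Int) (step : Int) (out : Int) : Decidable (Spec_game_score number step out) := by
  unfold Spec_game_score; infer_instance

-- ===== CLAIM (what is proved, stated in full; the proofs are below) =====
def Claim_equal_game_score : Prop := ∀ (number : Int) (step : Int), Dom_game_score number step → Pre_game_score number step → Spec_game_score number step (game_score number step)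

-- ===== LEMMAS AND PROOFS =====

-- closed form of the remaining iteration count from a given predict
def gsG (number step predict : Int) : Int :=
  if number ≤ predict then predict - number
  else
    -(PySem.Int.floordiv (-(number - predict)) step) +
      (-(PySem.Int.floordiv (-(number - predict)) step) * step + predict - number)

-- ceiling-division brackets, specialized
theorem gs_ceil_bracket (a b : Int) (hb : 0 < b) :
    (-(PySem.Int.floordiv (-a) b) - 1) * b < a ∧ a ≤ -(PySem.Int.floordiv (-a) b) * b := by
  exact (PySem.Int.neg_floordiv_neg_eq_iff_of_pos (a := a) (b := b)
    (q := -(PySem.Int.floordiv (-a) b)) hb).mp rfl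

theorem gsG_nonneg (number step predict : Int) (hs : 0 < step) : 0 ≤ gsG number step predict := by
  unfold gsG
  split_ifs with h
  · omega
  · have hb := gs_ceil_bracket (number - predict) step hs
    set k := -(PySem.Int.floordiv (-(number - predict)) step) with hk
    have hkpos : 0 < k := by nlinarith [hb.1, hb.2]
    nlinarith [hb.2]

theorem gsG_descend (number step predict : Int) (h : predict > number) :
    gsG number step predict = 1 + gsG number step (predict - 1) := by
  unfold gsG
  rw [if_pos (by omega), if_pos (by omega)]
  omega

theorem gsG_climb (number step predict : Int) (hs : 0 < step) (h : predict < number) :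
    gsG number step predict = 1 + gsG number step (predict + step) := by
  have hb := gs_ceil_bracket (number - predict) step hs
  set k := -(PySem.Int.floordiv (-(number - predict)) step) with hk
  have hkpos : 0 < k := by nlinarith [hb.1, hb.2]
  unfold gsG
  rw [if_neg (by omega)]
  by_cases h2 : number ≤ predict + step
  · rw [if_pos h2]
    -- here 0 < number - predict ≤ step, so k = 1
    have hk1 : k = 1 := by nlinarith [hb.1, hb.2]
    simp only [← hk, hk1]; ring
  · rw [if_neg h2]
    -- ceil((d - step)/step) = k - 1
    have hks : -(PySem.Int.floordiv (-(number - (predict + step))) step) = k - 1 := by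
      rw [PySem.Int.neg_floordiv_neg_eq_iff_of_pos hs]
      constructor <;> nlinarith [hb.1, hb.2]
    simp only [hks]; ring

theorem gs_loop_eq (number step : Int) (hs : 0 < step) :
    ∀ (fuel : Nat) (count predict : Int), (gsG number step predict).toNat < fuel →
      game_score_loop number step fuel count predict = count + gsG number step predict := by
  intro fuel
  induction fuel with
  | zero => intro _ _ h; omega
  | succ n ih =>
    intro count predict h
    by_cases he : number = predict
    · simp only [game_score_loop, if_pos he]
      unfold gsG
      rw [if_pos (by omega)]
      omega
    · by_cases hgt : number > predict
      · have hc := gsG_climb number step predict hs hgt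
        have hnn := gsG_nonneg number step (predict + step) hs
        simp only [game_score_loop, if_neg he, if_pos hgt]
        rw [ih (count + 1) (predict + step) (by omega)]
        omega
      · have hd := gsG_descend number step predict (by omega)
        have hnn := gsG_nonneg number step (predict - 1) hs
        simp only [game_score_loop, if_neg he, if_neg hgt]
        rw [ih (count + 1) (predict - 1) (by omega)]
        omega

-- descent-only version, valid for any step (used when number ≤ 0)
theorem gs_loop_descent (number step : Int) :
    ∀ (fuel : Nat) (count predict : Int), number ≤ predict → (predict - number).natAbs < fuel →
      game_score_loop number step fuel count predict = count + (predict - number) := by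
  intro fuel
  induction fuel with
  | zero => intro _ _ _ h; omega
  | succ n ih =>
    intro count predict hle h
    by_cases he : number = predict
    · simp only [game_score_loop, if_pos he]; omega
    · simp only [game_score_loop, if_neg he, if_neg (by omega : ¬ number > predict)]
      rw [ih (count + 1) (predict - 1) (by omega) (by omega)]
      omega

theorem game_score_spec : Claim_equal_game_score := by
  intro number step _ hpre
  simp only [Spec_game_score, game_score, game_score_alt]
  by_cases hn : number ≤ 0
  · rw [if_pos hn, gs_loop_descent number step _ 0 0 hn (by omega)]
    omega
  · have hs : 0 < step := hpre (by omega)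
    rw [if_neg hn]
    -- fuel bound: gsG at predict = 0 is k + (k*step - number) ≤ number + step - 1
    have hb : (-(PySem.Int.floordiv (-number) step) - 1) * step < number ∧
        number ≤ -(PySem.Int.floordiv (-number) step) * step := gs_ceil_bracket number step hs
    set k := -(PySem.Int.floordiv (-number) step) with hk
    have hkpos : 0 < k := by nlinarith [hb.1, hb.2]
    have hkle : k ≤ number := by nlinarith [hb.1, hb.2]
    have hG : gsG number step 0 = k + (k * step - number) := by
      simp only [gsG, if_neg (show ¬ number ≤ (0:Int) by omega), sub_zero, ← hk]
      ring
    have h1 : k * step - number < step := by nlinarith [hb.1]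
    have h2 : 0 ≤ k * step - number := by nlinarith [hb.2]
    have hfuel : (gsG number step 0).toNat < number.natAbs + step.natAbs + 1 := by
      rw [hG]; omega
    rw [gs_loop_eq number step hs _ 0 0 hfuel, hG]
    ring
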